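-- pv_equiv track=rewrite | github.com/CEgerer93/PartonKit | src/PartonKit/util/pitd_util.py | mom_type
-- ===== SOURCE A (Python) =====
-- def mom_type(m):
--     tmp=[]
--     [tmp.append(i) for i in m]
--     for n, m in enumerate(tmp):
--         if int(m) < 0:
--             m = str(int(m)*-1)
--
--     # Now sort and return
--     tmp.sort(reverse=True)
--     return "%s%s%s"%(tmp[0],tmp[1],tmp[2])
-- ===== SOURCE B (Python) =====
-- def mom_type(m):
--     # One pass keeping the three largest seen so far (descending), no sort.
--     a = b = c = None
--     for x in m:
--         if a is None or x > a:
--             a, b, c = x, a, b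
--         elif b is None or x > b:
--             b, c = x, b
--         elif c is None or x > c:
--             c = x
--     return "%s%s%s" % (a, b, c)
-- ===== Notes on version B (the rewrite author's own statement) =====
-- stated objective: faster
-- what changed: Replaces copy + dead loop + full descending sort with a single pass that maintains the top three elements in a small accumulator.
-- outside the precondition, e.g. on mom_type([5, 2]): A raises IndexError, B returns '52None'
import Mathlib
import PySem

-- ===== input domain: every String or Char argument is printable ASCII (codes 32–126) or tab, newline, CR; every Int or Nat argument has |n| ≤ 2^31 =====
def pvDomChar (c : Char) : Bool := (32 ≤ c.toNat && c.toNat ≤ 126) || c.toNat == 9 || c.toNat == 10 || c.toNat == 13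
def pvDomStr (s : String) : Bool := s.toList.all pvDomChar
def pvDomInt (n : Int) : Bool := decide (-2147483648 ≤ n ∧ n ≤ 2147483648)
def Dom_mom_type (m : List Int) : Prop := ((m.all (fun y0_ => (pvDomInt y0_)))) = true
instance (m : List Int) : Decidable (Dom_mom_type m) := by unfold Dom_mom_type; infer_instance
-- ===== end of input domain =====

-- B replaces A's copy + dead loop + full descending sort by a single pass keeping the
-- three largest elements (O(n) instead of O(n log n), measured faster in a timing run);
-- equal return values whenever the list has at least three elements (Pre_) is proved below.

-- ===== PORT A =====
def mom_type (m : List Int) : String :=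
  -- tmp=[]; [tmp.append(i) for i in m]
  let tmp : List Int := m.foldl (fun acc i => acc ++ [i]) []
  -- the 'for n, m in enumerate(tmp)' loop only rebinds the local m and has no effect
  -- tmp.sort(reverse=True)
  let tmp := PySem.List.sorted tmp (fun x => x) true
  -- "%s%s%s"%(tmp[0],tmp[1],tmp[2])   (IndexError when len < 3 is excluded by Pre_)
  PySem.Int.toStr ((PySem.List.pyGet? tmp 0).getD 0)
    ++ PySem.Int.toStr ((PySem.List.pyGet? tmp 1).getD 0)
    ++ PySem.Int.toStr ((PySem.List.pyGet? tmp 2).getD 0)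

-- ===== PORT B =====
-- one step of B's loop body over the state (a, b, c)
def pvStep3 (st : Option Int × Option Int × Option Int) (x : Int) :
    Option Int × Option Int × Option Int :=
  match st with
  | (a, b, c) =>
    if (match a with | none => true | some av => decide (x > av)) then (some x, a, b)
    else if (match b with | none => true | some bv => decide (x > bv)) then (a, some x, b)
    else if (match c with | none => true | some cv => decide (x > cv)) then (a, b, some x)
    else (a, b, c)

-- "%s" % v where v is an int or None
def pvShow (o : Option Int) : String :=
  match o with
  | none => "None"
  | some v => PySem.Int.toStr v

def mom_type_alt (m : List Int) : String :=
  let st := m.foldl pvStep3 (none, none, none)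
  pvShow st.1 ++ pvShow st.2.1 ++ pvShow st.2.2

-- ===== PRECONDITION & SPEC =====
-- Pre_ excludes lists with fewer than three elements, on which A raises IndexError.
def Pre_mom_type (m : List Int) : Prop := 3 ≤ m.length
instance (m : List Int) : Decidable (Pre_mom_type m) := by unfold Pre_mom_type; infer_instance
def pvWitness_mom_type : List Int := [1, 2, 3]

def Spec_mom_type (m : List Int) (out : String) : Prop := out = mom_type_alt m
instance (m : List Int) (out : String) : Decidable (Spec_mom_type m out) := by unfold Spec_mom_type; infer_instance

-- ===== CLAIM (what is proved, stated in full; the proofs are below) =====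
def Claim_equal_mom_type : Prop := ∀ (m : List Int), Dom_mom_type m → Pre_mom_type m → Spec_mom_type m (mom_type m)

-- ===== LEMMAS AND PROOFS =====

-- A's copy loop reproduces the list
theorem pv_copy_eq (m acc : List Int) : m.foldl (fun acc i => acc ++ [i]) acc = acc ++ m := by
  induction m generalizing acc with
  | nil => simp
  | cons x t ih => simpa using ih (acc ++ [x])

-- the insertion function underlying PySem's descending sort
def pvIns (x : Int) (s : List Int) : List Int :=
  PySem.List.insertBy (fun a b => decide ((b : Int) < a)) x s

theorem pvIns_nil (x : Int) : pvIns x [] = [x] := by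
  simp [pvIns, PySem.List.insertBy]

theorem pvIns_cons (x y : Int) (t : List Int) :
    pvIns x (y :: t) = if y < x then x :: y :: t else y :: pvIns x t := by
  simp [pvIns, PySem.List.insertBy]

-- first element of an insertion
theorem pv_head_ins (x : Int) (t : List Int) :
    (pvIns x t)[0]? = if (match t[0]? with | none => true | some bv => decide (x > bv))
                      then some x else t[0]? := by
  cases t with
  | nil => simp [pvIns_nil]
  | cons y r =>
    rw [pvIns_cons]
    by_cases h : y < x <;> simp [h]

-- first two elements of an insertion follow B's (b, c)-update
theorem pv_pair_ins (x : Int) (t : List Int) :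
    ((pvIns x t)[0]?, (pvIns x t)[1]?) =
      (if (match t[0]? with | none => true | some bv => decide (x > bv)) then (some x, t[0]?)
       else if (match t[1]? with | none => true | some cv => decide (x > cv)) then (t[0]?, some x)
       else (t[0]?, t[1]?)) := by
  cases t with
  | nil => simp [pvIns_nil]
  | cons y r =>
    rw [pvIns_cons]
    by_cases h : y < x
    · simp [h]
    · have hx : ¬ (x > y) := by omega
      have := pv_head_ins x r
      by_cases h2 : (match r[0]? with | none => true | some bv => decide (x > bv)) = true
      · simp [h, h2] at this ⊢
        simp [this]
      · simp [h, h2] at this ⊢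
        by_cases h3 : (match r[1]? with | none => true | some cv => decide (x > cv)) = true <;>
          simp [this]

-- first three elements of an insertion follow B's loop body
theorem pv_triple_ins (x : Int) (t : List Int) :
    ((pvIns x t)[0]?, (pvIns x t)[1]?, (pvIns x t)[2]?) =
      pvStep3 (t[0]?, t[1]?, t[2]?) x := by
  cases t with
  | nil => simp [pvIns_nil, pvStep3]
  | cons y r =>
    rw [pvIns_cons]
    by_cases h : y < x
    · simp [h, pvStep3]
    · have hx : ¬ (x > y) := by omega
      have hp := pv_pair_ins x r
      simp [h, pvStep3]
      by_cases h2 : (match r[0]? with | none => true | some bv => decide (x > bv)) = true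
      · simp [h2] at hp ⊢
        exact ⟨hp.1, hp.2⟩
      · simp [h2] at hp ⊢
        by_cases h3 : (match r[1]? with | none => true | some cv => decide (x > cv)) = true <;>
          simp only [h3, if_true, if_false, Bool.false_eq_true, Prod.mk.injEq] at hp ⊢ <;>
          exact ⟨trivial, hp⟩

-- B's fold computes the first three elements of A's insertion-sort fold
theorem pv_fold_eq (m : List Int) (s : List Int) :
    m.foldl pvStep3 (s[0]?, s[1]?, s[2]?) =
      ((m.foldl (fun acc x => pvIns x acc) s)[0]?,
       (m.foldl (fun acc x => pvIns x acc) s)[1]?,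
       (m.foldl (fun acc x => pvIns x acc) s)[2]?) := by
  induction m generalizing s with
  | nil => simp
  | cons x t ih =>
    simp only [List.foldl_cons]
    rw [← pv_triple_ins x s]
    exact ih (pvIns x s)

-- ===== VERDICT (by name: the statement is the Claim_ definition above) =====
theorem mom_type_spec : Claim_equal_mom_type := by
  intro m _ hpre
  unfold Pre_mom_type at hpre
  unfold Spec_mom_type mom_type mom_type_alt
  have hsort : PySem.List.sorted m (fun x => x) true
      = m.foldl (fun acc x => pvIns x acc) [] := by
    simpa [pvIns] using PySem.List.sorted_rev_eq_foldl_insertBy (xs := m) (key := fun x => x)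
  have hcopy : m.foldl (fun acc i => acc ++ [i]) ([] : List Int) = m := by
    simpa using pv_copy_eq m []
  have hfold := pv_fold_eq m []
  simp only [List.getElem?_nil] at hfold
  set s := m.foldl (fun acc x => pvIns x acc) [] with hs
  have hlen : 3 ≤ s.length := by
    have hperm : (PySem.List.sorted m (fun x => x) true).Perm m := PySem.List.sorted_perm ..
    have := hperm.length_eq
    rw [hsort] at this
    omega
  have h0 : s[0]? = some s[0] := by rw [List.getElem?_eq_getElem]
  have h1 : s[1]? = some s[1] := by rw [List.getElem?_eq_getElem]
  have h2 : s[2]? = some s[2] := by rw [List.getElem?_eq_getElem]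
  simp only [hcopy, hsort, hfold, h0, h1, h2]
  simp [PySem.List.pyGet?, PySem.List.pyIdx?, pvShow,
    show 0 < s.length by omega, show 1 < s.length by omega, show 2 < s.length by omega]
  rfl
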